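-- pv_equiv track=rewrite | github.com/june3780/source_code_GI_renewal | read_DEF_LEF/parsing_def.py | get_lines_by_idx
-- ===== SOURCE A (Python) =====
-- def get_lines_by_idx(index_dict,line):
--     temp_lines=['']
--     for idx in range(len(line)):
--         if idx<index_dict['start_idx'] or idx>index_dict['end_idx']:
--             continue
--         temp_lines[-1]=temp_lines[-1]+' '+line[idx].replace('\n','')
--         if line[idx].replace('\n','').strip().endswith(';'):
--             temp_lines.append('')
--
--
--     return temp_lines
-- ===== SOURCE B (Python) =====
-- def get_lines_by_idx(index_dict, line):
--     toks = [t.replace('\n', '')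
--             for i, t in enumerate(line)
--             if index_dict['start_idx'] <= i <= index_dict['end_idx']]
--     return _split(toks)
--
--
-- def _split(toks):
--     for k, t in enumerate(toks):
--         if t.strip().endswith(';'):
--             return [' ' + ' '.join(toks[:k + 1])] + _split(toks[k + 1:])
--     return [' ' + ' '.join(toks)] if toks else ['']
-- ===== Notes on version B (the rewrite author's own statement) =====
-- stated objective: alternative
-- what changed: B first materialises the cleaned in-range token list and then splits it recursively at the first ';'-terminated token (slice-and-recurse), instead of A's single left-to-right loop that accumulates strings in place into the last list element.
import Mathlib
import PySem

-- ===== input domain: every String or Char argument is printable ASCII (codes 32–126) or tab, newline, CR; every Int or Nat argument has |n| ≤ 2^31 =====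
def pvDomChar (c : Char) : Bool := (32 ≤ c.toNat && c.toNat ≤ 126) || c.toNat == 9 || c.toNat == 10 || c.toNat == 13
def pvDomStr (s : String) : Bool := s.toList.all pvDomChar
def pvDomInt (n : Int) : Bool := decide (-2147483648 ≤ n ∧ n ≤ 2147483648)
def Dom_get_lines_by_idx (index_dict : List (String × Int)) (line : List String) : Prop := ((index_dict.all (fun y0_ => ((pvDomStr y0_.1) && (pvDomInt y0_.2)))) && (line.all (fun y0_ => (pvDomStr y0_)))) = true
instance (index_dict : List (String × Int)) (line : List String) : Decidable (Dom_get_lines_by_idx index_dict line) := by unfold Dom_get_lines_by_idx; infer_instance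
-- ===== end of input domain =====

-- B materialises the cleaned in-range token list and splits it recursively at the first
-- ';'-terminated token, instead of A's in-place string accumulation; same cost, different algorithm.

-- ===== PORT A =====
-- A's loop 'for idx in range(len(line))' with the short-circuit test 'idx<d["start_idx"] or idx>d["end_idx"]';
-- a failing dict lookup (Python KeyError) is the 'none' branch, excluded by Pre_ below.
-- 'a + " " + b' on strings is ported exactly as PySem.Str.join " " [a, b].
def get_lines_by_idx (index_dict : List (String × Int)) (line : List String) : List String :=
  (PySem.List.pyRange 0 (line.length : Int) 1).foldl
    (fun temp_lines idx =>
      match (PySem.Dict.mk index_dict).get? "start_idx" with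
      | none => temp_lines  -- KeyError; unreachable under Pre_
      | some lo =>
        if idx < lo then temp_lines   -- continue (short-circuit: end_idx not looked up)
        else
          match (PySem.Dict.mk index_dict).get? "end_idx" with
          | none => temp_lines  -- KeyError; unreachable under Pre_
          | some hi =>
            if idx > hi then temp_lines  -- continue
            else
              -- temp_lines[-1] = temp_lines[-1] + ' ' + line[idx].replace('\n','')
              let tl := temp_lines.dropLast ++
                [PySem.Str.join " " [temp_lines.getLast!,
                   PySem.Str.replace (PySem.List.pyGetD line idx "") "\n" ""]]
              if PySem.Str.endswith
                   (PySem.Str.strip (PySem.Str.replace (PySem.List.pyGetD line idx "") "\n" "")) ";"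
              then tl ++ [""] else tl)
    [""]

-- ===== PORT B =====
-- Source B's "' ' + ' '.join(g)"; ' ' + ' '.join(g) is exactly PySem.Str.join " " ("" :: g);
-- the 'if toks else' guard makes this handle the empty final segment too.
def pvFmt (g : List String) : String :=
  if g.isEmpty then "" else PySem.Str.join " " ("" :: g)

-- Source B's _split: its for-loop-with-return finds the FIRST token whose strip() ends with ';'
-- (ported as List.findIdx?); toks[:k+1] / toks[k+1:] with 0 ≤ k+1 ≤ len are exactly take/drop.
def pvSplit (toks : List String) : List String :=
  match h : toks.findIdx? (fun t => PySem.Str.endswith (PySem.Str.strip t) ";") with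
  | some k => pvFmt (toks.take (k + 1)) :: pvSplit (toks.drop (k + 1))
  | none => [pvFmt toks]
termination_by toks.length
decreasing_by
  have hne : toks ≠ [] := by intro he; rw [he] at h; simp at h
  have : 0 < toks.length := List.length_pos_iff.mpr hne
  simp only [List.length_drop]; omega

-- the comprehension's chained test index_dict['start_idx'] <= i <= index_dict['end_idx']
-- (short-circuit: end_idx only looked up if the first comparison holds; a failing lookup,
-- Python KeyError, is a 'none' branch, excluded by Pre_ below)
def pvInRange (index_dict : List (String × Int)) (i : Int) : Bool :=
  match (PySem.Dict.mk index_dict).get? "start_idx" with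
  | none => false  -- KeyError; unreachable under Pre_
  | some lo =>
    if lo ≤ i then
      match (PySem.Dict.mk index_dict).get? "end_idx" with
      | none => false  -- KeyError; unreachable under Pre_
      | some hi => i ≤ hi
    else false

def get_lines_by_idx_alt (index_dict : List (String × Int)) (line : List String) : List String :=
  pvSplit (((PySem.List.enumerate line 0).filter
              (fun p => pvInRange index_dict p.1)).map
            (fun p => PySem.Str.replace p.2 "\n" ""))

-- ===== PRECONDITION & SPEC =====
-- Pre_ excludes exactly the inputs on which A (and B alike) raises KeyError: a non-empty line
-- with 'start_idx' missing, or 'end_idx' missing while some index reaches the second comparison.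
def Pre_get_lines_by_idx (index_dict : List (String × Int)) (line : List String) : Prop :=
  line = [] ∨
    ((PySem.Dict.mk index_dict).contains "start_idx" = true ∧
      ((PySem.Dict.mk index_dict).contains "end_idx" = true ∨
        (line.length : Int) ≤ (PySem.Dict.mk index_dict).getD "start_idx" 0))
instance (index_dict : List (String × Int)) (line : List String) : Decidable (Pre_get_lines_by_idx index_dict line) := by unfold Pre_get_lines_by_idx; infer_instance

def pvWitness_get_lines_by_idx : (List (String × Int)) × List String :=
  ([("start_idx", 0), ("end_idx", 1)], ["a;", "b"])

def Spec_get_lines_by_idx (index_dict : List (String × Int)) (line : List String) (out : List String) : Prop := out = get_lines_by_idx_alt index_dict line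
instance (index_dict : List (String × Int)) (line : List String) (out : List String) : Decidable (Spec_get_lines_by_idx index_dict line out) := by unfold Spec_get_lines_by_idx; infer_instance

-- ===== CLAIM (what is proved, stated in full; the proofs are below) =====
def Claim_equal_get_lines_by_idx : Prop := ∀ (index_dict : List (String × Int)) (line : List String), Dom_get_lines_by_idx index_dict line → Pre_get_lines_by_idx index_dict line → Spec_get_lines_by_idx index_dict line (get_lines_by_idx index_dict line)

-- ===== LEMMAS AND PROOFS =====

-- cut test and A's loop body with the lookups resolved
def pvCut (t : String) : Bool := PySem.Str.endswith (PySem.Str.strip t) ";"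

def pvStep (tl : List String) (t : String) : List String :=
  let tl' := tl.dropLast ++ [PySem.Str.join " " [tl.getLast!, t]]
  if pvCut t then tl' ++ [""] else tl'

theorem chars_join_concat (sep t : List Char) :
    ∀ (L : List (List Char)), L ≠ [] →
      PySem.Chars.join sep (L ++ [t]) = PySem.Chars.join sep L ++ sep ++ t
  | [a], _ => by
      simp only [List.cons_append, List.nil_append, PySem.Chars.join_cons_cons,
        PySem.Chars.join_singleton]
  | (a :: b :: r), _ => by
      have ih := chars_join_concat sep t (b :: r) (by simp)
      simp only [List.cons_append] at ih ⊢
      rw [PySem.Chars.join_cons_cons, ih, PySem.Chars.join_cons_cons]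
      simp [List.append_assoc]

theorem pvJoin_append_singleton (sep : String) (L : List String) (t : String) (h : L ≠ []) :
    PySem.Str.join sep (L ++ [t]) = PySem.Str.join sep [PySem.Str.join sep L, t] := by
  apply String.toList_inj.mp
  simp [PySem.Str.toList_join]
  rw [chars_join_concat sep.toList t.toList (L.map String.toList) (by simpa using h)]
  rw [PySem.Chars.join_cons_cons]
  simp [PySem.Chars.join_singleton]

theorem pvFmt_append (g : List String) (t : String) :
    pvFmt (g ++ [t]) = PySem.Str.join " " [pvFmt g, t] := by
  cases g with
  | nil => simp [pvFmt]
  | cons x xs =>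
      have h1 : pvFmt ((x :: xs) ++ [t]) = PySem.Str.join " " (("" :: x :: xs) ++ [t]) := by
        simp [pvFmt]
      rw [h1, pvJoin_append_singleton " " ("" :: x :: xs) t (by simp)]
      simp [pvFmt]

-- pvSplit's defining equation, usable for rewriting
theorem pvSplit_eq (toks : List String) :
    pvSplit toks =
      match toks.findIdx? (fun t => PySem.Str.endswith (PySem.Str.strip t) ";") with
      | some k => pvFmt (toks.take (k + 1)) :: pvSplit (toks.drop (k + 1))
      | none => [pvFmt toks] := by
  cases hf : toks.findIdx? (fun t => PySem.Str.endswith (PySem.Str.strip t) ";") with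
  | none => rw [pvSplit, hf]
  | some k => rw [pvSplit, hf]

-- A's accumulator fold over the cleaned in-range tokens computes pvSplit with a pending
-- prefix group g (whose formatted form is the open last line).
theorem pvFold_split : ∀ (ts : List String) (g : List String) (acc : List String),
    ts.foldl pvStep (acc ++ [pvFmt g]) =
      acc ++ (match ts.findIdx? (fun t => PySem.Str.endswith (PySem.Str.strip t) ";") with
              | some k => pvFmt (g ++ ts.take (k + 1)) :: pvSplit (ts.drop (k + 1))
              | none => [pvFmt (g ++ ts)])
  | [], g, acc => by simp
  | (t :: ts), g, acc => by
      have hstep : pvStep (acc ++ [pvFmt g]) t =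
          if pvCut t then (acc ++ [pvFmt (g ++ [t])]) ++ [pvFmt []]
          else acc ++ [pvFmt (g ++ [t])] := by
        unfold pvStep
        rw [show (acc ++ [pvFmt g]).dropLast = acc by simp,
            show (acc ++ [pvFmt g]).getLast! = pvFmt g by simp,
            ← pvFmt_append]
        rfl
      simp only [List.foldl_cons, hstep, List.findIdx?_cons]
      by_cases hc : pvCut t
      · rw [if_pos hc]
        rw [pvFold_split ts [] (acc ++ [pvFmt (g ++ [t])])]
        simp only [pvCut] at hc
        simp only [hc, if_true, List.nil_append]
        rw [← pvSplit_eq ts]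
        simp
      · rw [if_neg hc]
        rw [pvFold_split ts (g ++ [t]) acc]
        simp only [pvCut, Bool.not_eq_true] at hc
        simp only [hc, Bool.false_eq_true, if_false]
        cases hf : ts.findIdx? (fun t => PySem.Str.endswith (PySem.Str.strip t) ";") with
        | none => simp
        | some k => simp [List.append_assoc]

-- fold over the index range with the in-range test = fold over the filtered, cleaned tokens
theorem pvFilter_fold (lo hi : Int) (f : Int → String) :
    ∀ (l : List Int) (init : List String),
      l.foldl (fun tl i => if i < lo then tl else if i > hi then tl else pvStep tl (f i)) init
        = ((l.filter (fun i => decide (lo ≤ i) && decide (i ≤ hi))).map f).foldl pvStep init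
  | [], _ => rfl
  | (i :: l), init => by
      rw [List.foldl_cons, List.filter_cons]
      by_cases h1 : i < lo
      · rw [if_pos h1, if_neg (by simp; intro h; omega)]
        exact pvFilter_fold lo hi f l init
      · rw [if_neg h1]
        by_cases h2 : i > hi
        · rw [if_pos h2, if_neg (by simp; omega)]
          exact pvFilter_fold lo hi f l init
        · rw [if_neg h2, if_pos (by simp; omega), List.map_cons, List.foldl_cons]
          exact pvFilter_fold lo hi f l (pvStep init (f i))

-- a fold whose body never changes the state returns its initial state
theorem pvFoldl_id {α β : Type} (f : α → β → α) :
    ∀ (l : List β) (init : α), (∀ s x, x ∈ l → f s x = s) → l.foldl f init = init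
  | [], _, _ => rfl
  | (x :: l), init, h => by
      rw [List.foldl_cons, h init x (by simp)]
      exact pvFoldl_id f l init (fun s y hy => h s y (by simp [hy]))

theorem pvSplit_nil : pvSplit [] = [""] := by
  rw [pvSplit_eq]
  simp [pvFmt]

theorem pv_main (index_dict : List (String × Int)) (line : List String)
    (hpre : Pre_get_lines_by_idx index_dict line) :
    get_lines_by_idx index_dict line = get_lines_by_idx_alt index_dict line := by
  unfold get_lines_by_idx get_lines_by_idx_alt
  rcases hpre with hnil | ⟨h1, h2⟩
  · -- empty line: the range and the enumeration are both empty
    subst hnil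
    simp [pvSplit_nil]
  obtain ⟨lo, hlo⟩ : ∃ lo, (PySem.Dict.mk index_dict).get? "start_idx" = some lo := by
    rw [PySem.Dict.contains_eq_isSome_get?] at h1
    exact Option.isSome_iff_exists.mp h1
  rcases h2 with h2 | h2
  · -- both keys present: the general case
    obtain ⟨hi, hhi⟩ : ∃ hi, (PySem.Dict.mk index_dict).get? "end_idx" = some hi := by
      rw [PySem.Dict.contains_eq_isSome_get?] at h2
      exact Option.isSome_iff_exists.mp h2
    rw [hlo, hhi]
    have hrange : (fun (p : Int × String) => pvInRange index_dict p.1)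
        = (fun p => decide (lo ≤ p.1) && decide (p.1 ≤ hi)) := by
      funext p
      unfold pvInRange
      rw [hlo, hhi]
      by_cases h : lo ≤ p.1 <;> simp [h]
    -- A's fold body = the filtered fold of pvStep
    have hbody : (fun (temp_lines : List String) (idx : Int) =>
        if idx < lo then temp_lines
        else if idx > hi then temp_lines
        else
          let tl := temp_lines.dropLast ++
            [PySem.Str.join " " [temp_lines.getLast!,
               PySem.Str.replace (PySem.List.pyGetD line idx "") "\n" ""]]
          if PySem.Str.endswith
               (PySem.Str.strip (PySem.Str.replace (PySem.List.pyGetD line idx "") "\n" "")) ";"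
          then tl ++ [""] else tl)
        = (fun tl i => if i < lo then tl else if i > hi then tl
            else pvStep tl (PySem.Str.replace (PySem.List.pyGetD line i "") "\n" "")) := by
      funext tl i
      simp only [pvStep, pvCut]
      split_ifs <;> simp [List.append_assoc]
    rw [hbody,
      pvFilter_fold lo hi (fun i => PySem.Str.replace (PySem.List.pyGetD line i "") "\n" ""),
      hrange]
    -- B's token list is that same filtered, cleaned list
    have hlist : (((PySem.List.enumerate line 0).filter
          (fun p => decide (lo ≤ p.1) && decide (p.1 ≤ hi))).map
        (fun p => PySem.Str.replace p.2 "\n" ""))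
        = ((PySem.List.pyRange 0 (line.length : Int) 1).filter
            (fun i => decide (lo ≤ i) && decide (i ≤ hi))).map
          (fun i => PySem.Str.replace (PySem.List.pyGetD line i "") "\n" "") := by
      rw [PySem.List.enumerate_eq_map_pyRange (d := ""), List.filter_map, List.map_map]
      simp [Function.comp_def]
    rw [hlist]
    have hfold := pvFold_split
      (((PySem.List.pyRange 0 (line.length : Int) 1).filter
          (fun i => decide (lo ≤ i) && decide (i ≤ hi))).map
        (fun i => PySem.Str.replace (PySem.List.pyGetD line i "") "\n" "")) [] []
    simp only [List.nil_append] at hfold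
    rw [show ([""] : List String) = [pvFmt []] from rfl, hfold, ← pvSplit_eq]
  · -- end_idx may be missing: every index is below start_idx, so neither side keeps anything
    have hlen : (line.length : Int) ≤ lo := by
      rwa [PySem.Dict.getD_eq_get?_getD, hlo, Option.getD_some] at h2
    rw [hlo]
    rw [pvFoldl_id _ _ _ (by
      intro s x hx
      have hx' := (PySem.List.mem_pyRange_one).mp hx
      have hxl : x < lo := by omega
      simp [hxl])]
    have hfilter : ((PySem.List.enumerate line 0).filter
        (fun p => pvInRange index_dict p.1)) = [] := by
      rw [List.filter_eq_nil_iff]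
      intro p hp
      obtain ⟨k, hk, rfl⟩ := (PySem.List.mem_enumerate_iff _ _ _).mp hp
      unfold pvInRange
      rw [hlo]
      have hnk : ¬ (lo ≤ (k : Int)) := by omega
      simp [hnk]
    rw [hfilter]
    simp [pvSplit_nil]

-- ===== VERDICT (by name: the statement is the Claim_ definition above) =====
theorem get_lines_by_idx_spec : Claim_equal_get_lines_by_idx := by
  intro index_dict line _ hpre
  unfold Spec_get_lines_by_idx
  exact pv_main index_dict line hpre
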